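-- pv_equiv track=rewrite | github.com/mikewyer/aoc2021 | 2022/07.py | cmd_output
-- ===== SOURCE A (Python) =====
-- from typing import Dict, List, Union
--
-- def cmd_output(input: List[str]):
--     cmd = ""
--     output = []
--     for row in input:
--         if row.startswith("$"):
--             if cmd:
--                 yield cmd, output
--             cmd = row[2:]
--             output = []
--         else:
--             output.append(row)
--     if cmd:
--         yield cmd, output
-- ===== SOURCE B (Python) =====
-- def cmd_output(input):
--     # Two-pointer scan over command-line positions instead of an accumulator fold.
--     i = 0
--     n = len(input)
--     while i < n and not input[i].startswith("$"):
--         i += 1  # leading lines before the first command are dropped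
--     while i < n:
--         j = i + 1
--         while j < n and not input[j].startswith("$"):
--             j += 1
--         cmd = input[i][2:]
--         if cmd:
--             yield cmd, input[i + 1:j]
--         i = j
-- ===== Notes on version B (the rewrite author's own statement) =====
-- stated objective: alternative
-- what changed: Replaces A's single accumulator fold (carrying cmd/output state and flushing on each '$' line) with a two-pointer scan that locates each command line and slices its output block up to the next command line.
import Mathlib
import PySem

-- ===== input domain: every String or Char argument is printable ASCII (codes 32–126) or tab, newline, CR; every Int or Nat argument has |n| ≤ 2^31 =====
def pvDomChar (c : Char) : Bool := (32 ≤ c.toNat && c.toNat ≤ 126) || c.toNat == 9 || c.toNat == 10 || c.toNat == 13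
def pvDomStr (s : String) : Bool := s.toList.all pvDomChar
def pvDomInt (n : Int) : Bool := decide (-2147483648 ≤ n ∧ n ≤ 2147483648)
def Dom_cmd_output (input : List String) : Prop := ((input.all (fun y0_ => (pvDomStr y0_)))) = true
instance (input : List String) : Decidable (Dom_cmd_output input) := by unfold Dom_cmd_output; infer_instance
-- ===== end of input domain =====

-- B replaces A's accumulator fold with a two-pointer/segment scan; same values, alternative structure.
-- Equivalence is about the yielded sequence (both Pythons are generators, compared as lists).

-- ===== PORT A =====
-- A's loop, state (cmd, output); a yield becomes emitting onto the result list.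
def cmdOutputGoA (cmd : String) (output : List String) : List String → List (String × List String)
  | [] => if cmd ≠ "" then [(cmd, output)] else []
  | row :: rest =>
    if PySem.Str.startswith row "$" then
      (if cmd ≠ "" then [(cmd, output)] else []) ++ cmdOutputGoA (PySem.Str.slice row (some 2) none) [] rest
    else
      cmdOutputGoA cmd (output ++ [row]) rest

def cmd_output (input : List String) : List (String × List String) :=
  cmdOutputGoA "" [] input

-- ===== PORT B =====
-- B's outer loop: the list at a command line; the inner j-scan is the takeWhile/dropWhile split.
def cmdOutputGoB : List String → List (String × List String)
  | [] => []
  | row :: rest =>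
    let out := rest.takeWhile (fun r => !PySem.Str.startswith r "$")
    let rest' := rest.dropWhile (fun r => !PySem.Str.startswith r "$")
    let cmd := PySem.Str.slice row (some 2) none
    (if cmd ≠ "" then [(cmd, out)] else []) ++ cmdOutputGoB rest'
  termination_by l => l.length
  decreasing_by
    simp only [List.length_cons]
    exact Nat.lt_succ_of_le (List.length_dropWhile_le _ _)

def cmd_output_alt (input : List String) : List (String × List String) :=
  cmdOutputGoB (input.dropWhile (fun r => !PySem.Str.startswith r "$"))

-- ===== PRECONDITION & SPEC =====
def Spec_cmd_output (input : List String) (out : List (String × List String)) : Prop := out = cmd_output_alt input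
instance (input : List String) (out : List (String × List String)) : Decidable (Spec_cmd_output input out) := by unfold Spec_cmd_output; infer_instance

-- ===== CLAIM (what is proved, stated in full; the proofs are below) =====
def Claim_equal_cmd_output : Prop := ∀ (input : List String), Dom_cmd_output input → Spec_cmd_output input (cmd_output input)

-- ===== LEMMAS AND PROOFS =====
theorem cmdOutputGoA_eq (l : List String) : ∀ (cmd : String) (output : List String),
    cmdOutputGoA cmd output l =
      (if cmd ≠ "" then [(cmd, output ++ l.takeWhile (fun r => !PySem.Str.startswith r "$"))] else [])
        ++ cmdOutputGoB (l.dropWhile (fun r => !PySem.Str.startswith r "$")) := by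
  induction l with
  | nil => intro cmd output; simp [cmdOutputGoA, cmdOutputGoB]
  | cons row rest ih =>
    intro cmd output
    by_cases h : PySem.Str.startswith row "$" = true
    · have h' : PySem.Chars.startswith row.toList ['$'] = true := by simpa using h
      rw [show cmdOutputGoA cmd output (row :: rest)
          = (if cmd ≠ "" then [(cmd, output)] else [])
            ++ cmdOutputGoA (PySem.Str.slice row (some 2) none) [] rest from by
          simp [cmdOutputGoA, h']]
      rw [ih]
      rw [show (row :: rest).takeWhile (fun r => !PySem.Str.startswith r "$") = [] from by
            simp [h'],
          show (row :: rest).dropWhile (fun r => !PySem.Str.startswith r "$") = row :: rest from by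
            simp [h']]
      rw [show cmdOutputGoB (row :: rest)
          = (if PySem.Str.slice row (some 2) none ≠ "" then
              [(PySem.Str.slice row (some 2) none, rest.takeWhile (fun r => !PySem.Str.startswith r "$"))] else [])
            ++ cmdOutputGoB (rest.dropWhile (fun r => !PySem.Str.startswith r "$")) from by
          rw [cmdOutputGoB]]
      simp
    · have h' : PySem.Chars.startswith row.toList ['$'] = false := by simpa using h
      rw [show cmdOutputGoA cmd output (row :: rest)
          = cmdOutputGoA cmd (output ++ [row]) rest from by
          simp [cmdOutputGoA, h']]
      rw [ih]
      rw [show (row :: rest).takeWhile (fun r => !PySem.Str.startswith r "$")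
            = row :: rest.takeWhile (fun r => !PySem.Str.startswith r "$") from by
            simp [h'],
          show (row :: rest).dropWhile (fun r => !PySem.Str.startswith r "$")
            = rest.dropWhile (fun r => !PySem.Str.startswith r "$") from by
            simp [h']]
      simp

-- ===== VERDICT (by name: the statement is the Claim_ definition above) =====
theorem cmd_output_spec : Claim_equal_cmd_output := by
  intro input _
  unfold Spec_cmd_output cmd_output cmd_output_alt
  rw [cmdOutputGoA_eq]
  simp
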